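-- pv_equiv track=rewrite | github.com/n11ckz/zavodov-vsuet | python-tasks/lesson9/task1.py | isMagicMatrix
-- ===== SOURCE A (Python) =====
-- def isSquareMatrix(array: list) -> bool:
--     lengthToCompare: int = len(array)
--     for i in range(len(array)):
--         if len(array[i]) != lengthToCompare:
--             return False
--     return True
--
-- def isMagicMatrix(array: list) -> bool:
--     if not isSquareMatrix(array):
--         return False
--     sumToCompare: int = sum(array[0])
--     columnSum: int = 0
--     for i in range(len(array)):
--         rowSum: int = sum(array[i])
--         for j in range(len(array[i])):
--             columnSum += array[j][i]
--         if (rowSum != sumToCompare) or (columnSum != sumToCompare):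
--             return False
--         columnSum = 0
--     return True
-- ===== SOURCE B (Python) =====
-- def isMagicMatrix(array: list) -> bool:
--     n = len(array)
--     if any(len(row) != n for row in array):
--         return False
--     target = sum(array[0])
--     # column sums built incrementally: one pass over rows, vector accumulator,
--     # columns are never indexed individually
--     cols = [0] * n
--     for row in array:
--         cols = [c + x for c, x in zip(cols, row)]
--     return all(sum(row) == target for row in array) and cols == [target] * n
-- ===== Notes on version B (the rewrite author's own statement) =====
-- stated objective: alternative
-- what changed: Column sums are no longer computed by an inner index loop per column: B keeps a vector accumulator of all column sums updated elementwise (zip) in a single pass over the rows and compares it to [target]*n at the end, with the row-sum check as a separate whole-matrix pass instead of A's interleaved early-return nested loops.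
import Mathlib
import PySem

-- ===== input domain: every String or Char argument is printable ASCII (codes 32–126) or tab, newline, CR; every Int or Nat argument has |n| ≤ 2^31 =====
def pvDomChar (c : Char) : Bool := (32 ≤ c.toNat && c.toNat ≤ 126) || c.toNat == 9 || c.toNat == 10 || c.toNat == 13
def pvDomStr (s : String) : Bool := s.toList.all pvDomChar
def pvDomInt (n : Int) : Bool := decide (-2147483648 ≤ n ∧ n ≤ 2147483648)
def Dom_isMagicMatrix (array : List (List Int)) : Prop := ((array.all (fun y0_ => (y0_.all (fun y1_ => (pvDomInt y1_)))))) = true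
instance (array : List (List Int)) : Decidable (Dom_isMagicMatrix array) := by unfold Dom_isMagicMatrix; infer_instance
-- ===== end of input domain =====

-- B replaces A's per-column inner index loop by a single pass over the rows that maintains a
-- vector accumulator of all column sums (elementwise zip) compared to [target]*n at the end.


-- ===== PORT A =====
-- 'for i in range(len(array)): if len(array[i]) != lengthToCompare: return False' — early-return loop over indices
def pvSquareLoop (array : List (List Int)) (n : Nat) : List Nat → Bool
  | [] => true
  | i :: rest => if (array.getD i []).length ≠ n then false else pvSquareLoop array n rest

def pvIsSquareMatrix (array : List (List Int)) : Bool :=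
  pvSquareLoop array array.length (List.range array.length)

-- inner loop 'for j in range(len(array[i])): columnSum += array[j][i]' (indices in range whenever reached)
def pvColSumLoop (array : List (List Int)) (i : Nat) : List Nat → Int → Int
  | [], acc => acc
  | j :: rest, acc => pvColSumLoop array i rest (acc + (array.getD j []).getD i 0)

-- outer loop 'for i in range(len(array)): …' with its early return
def pvMagicLoop (array : List (List Int)) (s : Int) : List Nat → Bool
  | [] => true
  | i :: rest =>
    let rowSum : Int := (array.getD i []).sum
    let columnSum : Int := pvColSumLoop array i (List.range (array.getD i []).length) 0
    if rowSum ≠ s ∨ columnSum ≠ s then false else pvMagicLoop array s rest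

def isMagicMatrix (array : List (List Int)) : Bool :=
  if ¬ pvIsSquareMatrix array then false
  else
    -- sum(array[0]): array[0] read with headD; Pre_ excludes [] where Python raises IndexError
    let sumToCompare : Int := (array.headD []).sum
    pvMagicLoop array sumToCompare (List.range array.length)

-- ===== PORT B =====
def isMagicMatrix_alt (array : List (List Int)) : Bool :=
  let n := array.length
  if array.any (fun row => row.length ≠ n) then false
  else
    -- sum(array[0]): Pre_ excludes [] where Python raises IndexError
    let target : Int := (array.headD []).sum
    -- 'cols = [c + x for c, x in zip(cols, row)]' folded over the rows
    let cols := array.foldl (fun acc row => List.zipWith (· + ·) acc row) (List.replicate n (0 : Int))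
    (array.all (fun row => row.sum == target)) && (cols == List.replicate n target)

-- ===== PRECONDITION & SPEC =====
-- Pre_ excludes only the empty matrix, on which Python's sum(array[0]) raises IndexError (in A and in B).
def Pre_isMagicMatrix (array : List (List Int)) : Prop := array ≠ []
instance (array : List (List Int)) : Decidable (Pre_isMagicMatrix array) := by unfold Pre_isMagicMatrix; infer_instance
def pvWitness_isMagicMatrix : List (List Int) := [[2, 0], [0, 2]]

def Spec_isMagicMatrix (array : List (List Int)) (out : Bool) : Prop := out = isMagicMatrix_alt array
instance (array : List (List Int)) (out : Bool) : Decidable (Spec_isMagicMatrix array out) := by unfold Spec_isMagicMatrix; infer_instance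

-- ===== CLAIM (what is proved, stated in full; the proofs are below) =====
def Claim_equal_isMagicMatrix : Prop := ∀ (array : List (List Int)), Dom_isMagicMatrix array → Pre_isMagicMatrix array → Spec_isMagicMatrix array (isMagicMatrix array)

-- ===== LEMMAS AND PROOFS =====

theorem getD_lt {α : Type} (a : List α) (d : α) (i : Nat) (hi : i < a.length) :
    a.getD i d = a[i] := by
  simp [List.getD_eq_getElem?_getD, List.getElem?_eq_getElem hi]

-- a ∀ over range-indices read back through getD is a ∀ over the list
theorem forall_range_getD {α : Type} (a : List α) (d : α) (p : α → Prop) :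
    (∀ i ∈ List.range a.length, p (a.getD i d)) ↔ ∀ x ∈ a, p x := by
  simp only [List.mem_range]
  constructor
  · intro h x hx
    rcases List.mem_iff_getElem.mp hx with ⟨i, hi, rfl⟩
    have := h i hi
    rwa [getD_lt a d i hi] at this
  · intro h i hi
    rw [getD_lt a d i hi]
    exact h _ (List.getElem_mem hi)

theorem range_map_getD {α β : Type} (a : List α) (d : α) (f : α → β) :
    (List.range a.length).map (fun i => f (a.getD i d)) = a.map f := by
  induction a with
  | nil => simp
  | cons x xs ih =>
    simp only [List.length_cons, List.range_succ_eq_map, List.map_cons, List.map_map]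
    refine congrArg (fun l => f x :: l) ?_
    simpa [Function.comp_def] using ih

theorem pvSquareLoop_iff (array : List (List Int)) (n : Nat) (l : List Nat) :
    pvSquareLoop array n l = true ↔ ∀ i ∈ l, (array.getD i []).length = n := by
  induction l with
  | nil => simp [pvSquareLoop]
  | cons i rest ih =>
    simp only [pvSquareLoop, List.getD_eq_getElem?_getD] at ih ⊢
    by_cases h : (array[i]?.getD []).length = n
    · simp [h, ih]
    · simp [h]

theorem pvColSumLoop_eq (array : List (List Int)) (i : Nat) (l : List Nat) (acc : Int) :
    pvColSumLoop array i l acc = acc + (l.map (fun j => (array.getD j []).getD i 0)).sum := by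
  induction l generalizing acc with
  | nil => simp [pvColSumLoop]
  | cons j rest ih =>
    simp only [pvColSumLoop, List.map_cons, List.sum_cons, ih]
    ring

theorem pvMagicLoop_iff (array : List (List Int)) (s : Int) (l : List Nat) :
    pvMagicLoop array s l = true ↔
      ∀ i ∈ l, (array.getD i []).sum = s ∧
        pvColSumLoop array i (List.range (array.getD i []).length) 0 = s := by
  induction l with
  | nil => simp [pvMagicLoop]
  | cons i rest ih =>
    simp only [pvMagicLoop, List.getD_eq_getElem?_getD] at ih ⊢
    by_cases h1 : (array[i]?.getD []).sum = s
    · by_cases h2 : pvColSumLoop array i (List.range (array[i]?.getD []).length) 0 = s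
      · simp [h1, h2, ih]
      · simp [h1, h2]
    · simp [h1]

-- B's zip-based fold computes, in position i, the i-th column sum on top of the initial vector
theorem colsFold_spec (n : Nat) (l : List (List Int)) (hl : ∀ row ∈ l, row.length = n)
    (init : List Int) (hinit : init.length = n) :
    (l.foldl (fun acc row => List.zipWith (· + ·) acc row) init).length = n ∧
      ∀ i < n, (l.foldl (fun acc row => List.zipWith (· + ·) acc row) init).getD i 0
        = init.getD i 0 + (l.map (fun row => row.getD i 0)).sum := by
  induction l generalizing init with
  | nil => simp [hinit]
  | cons row rest ih =>
    have hrow : row.length = n := hl row (List.mem_cons_self)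
    have hlen : (List.zipWith (· + ·) init row).length = n := by
      simp [List.length_zipWith, hinit, hrow]
    have step := ih (fun r hr => hl r (List.mem_cons_of_mem _ hr)) (List.zipWith (· + ·) init row) hlen
    refine ⟨by simpa [List.foldl_cons] using step.1, ?_⟩
    intro i hi
    have hz : (List.zipWith (· + ·) init row).getD i 0 = init.getD i 0 + row.getD i 0 := by
      have hi1 : i < init.length := by omega
      have hi2 : i < row.length := by omega
      have hiz : i < (List.zipWith (· + ·) init row).length := by omega
      rw [getD_lt _ _ _ hiz, getD_lt _ _ _ hi1, getD_lt _ _ _ hi2, List.getElem_zipWith]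
    have := step.2 i hi
    simp only [List.foldl_cons] at this ⊢
    rw [this, hz, List.map_cons, List.sum_cons]
    ring

theorem isMagicMatrix_spec : Claim_equal_isMagicMatrix := by
  intro array _ _
  unfold Spec_isMagicMatrix isMagicMatrix isMagicMatrix_alt pvIsSquareMatrix
  by_cases hS : ∀ row ∈ array, row.length = array.length
  · -- square: A's guard passes and B's any-check fails; compare the main passes
    have hA : pvSquareLoop array array.length (List.range array.length) = true :=
      (pvSquareLoop_iff array array.length (List.range array.length)).mpr
        ((forall_range_getD array [] (fun row => row.length = array.length)).mpr hS)
    have hB : array.any (fun row => row.length ≠ array.length) = false := by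
      simp only [List.any_eq_false, decide_not]
      intro row hrow
      simp [hS row hrow]
    rw [hA]
    simp only [hB, Bool.false_eq_true, if_false, not_true]
    set n := array.length with hn
    set target : Int := (array.headD []).sum with htarget
    set cols := array.foldl (fun acc row => List.zipWith (· + ·) acc row)
      (List.replicate n (0 : Int)) with hcols
    have hfold := colsFold_spec n array hS (List.replicate n 0) (by simp)
    rw [← hcols] at hfold
    have hfoldD : ∀ i < n, cols.getD i 0 = (array.map (fun row => row.getD i 0)).sum := by
      intro i hi
      have := hfold.2 i hi
      have hrep : (List.replicate n (0 : Int)).getD i 0 = 0 := by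
        rw [getD_lt _ _ _ (by simpa using hi)]; simp
      rw [this, hrep]; ring
    -- B's column comparison ↔ every column sums to target
    have hcolsB : (cols == List.replicate n target) = true ↔
        ∀ i < n, (array.map (fun row => row.getD i 0)).sum = target := by
      rw [beq_iff_eq]
      constructor
      · intro h i hi
        rw [← hfoldD i hi, h, getD_lt _ _ _ (by simpa using hi)]
        simp
      · intro h
        apply List.ext_getElem (by simp [hfold.1])
        intro i hi1 hi2
        have hi : i < n := by simpa [hfold.1] using hi1
        rw [← getD_lt cols 0 i hi1, hfoldD i hi, h i hi]
        simp
    -- A's inner loop computes the same column sums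
    have hcol : ∀ i, i < n →
        pvColSumLoop array i (List.range (array.getD i []).length) 0
          = (array.map (fun row => row.getD i 0)).sum := by
      intro i hi
      have hrowlen : (array.getD i []).length = n := by
        rw [getD_lt array [] i hi]
        exact hS _ (List.getElem_mem hi)
      rw [pvColSumLoop_eq, hrowlen, hn, range_map_getD array [] (fun row => row.getD i 0)]
      ring
    rw [Bool.eq_iff_iff, pvMagicLoop_iff, Bool.and_eq_true, hcolsB]
    constructor
    · intro h
      refine ⟨?_, ?_⟩
      · simp only [List.all_eq_true, beq_iff_eq]
        exact (forall_range_getD array [] (fun row => row.sum = target)).mp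
          (fun i hi => (h i hi).1)
      · intro i hi
        rw [← hcol i hi]
        exact (h i (List.mem_range.mpr hi)).2
    · intro h i hi
      have hi' : i < n := List.mem_range.mp hi
      simp only [List.all_eq_true, beq_iff_eq] at h
      refine ⟨?_, ?_⟩
      · rw [getD_lt array [] i hi']
        exact h.1 _ (List.getElem_mem hi')
      · rw [hcol i hi']
        exact h.2 i hi'
  · -- not square: both sides are false
    have hA : pvSquareLoop array array.length (List.range array.length) = false := by
      rw [Bool.eq_false_iff]
      intro hc
      exact hS ((forall_range_getD array [] (fun row => row.length = array.length)).mp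
        ((pvSquareLoop_iff array array.length (List.range array.length)).mp hc))
    rw [hA]
    simp
    intro h1 _
    exact absurd h1 hS
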